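-- pv_equiv track=rewrite | github.com/Beastie971/My_IA | CPH/legal-ia/app.py | extract_discussion_section
-- ===== SOURCE A (Python) =====
-- def extract_discussion_section(text):
--     lines = text.splitlines()
--     discussion_lines = []
--     capture = False
--     for line in lines:
--         if "discussion" in line.lower():
--             capture = True
--         elif capture and line.strip() == "":
--             break
--         if capture:
--             discussion_lines.append(line)
--     return "\n".join(discussion_lines) if discussion_lines else text
-- ===== SOURCE B (Python) =====
-- def _drop_until_discussion(lines):
--     # dropwhile: skip lines until one mentions "discussion"
--     while lines and "discussion" not in lines[0].lower():
--         lines = lines[1:]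
--     return lines
--
-- def _take_until_blank(lines):
--     # takewhile: keep lines up to (not including) the first blank one
--     out = []
--     for line in lines:
--         if line.strip() == "":
--             break
--         out.append(line)
--     return out
--
-- def extract_discussion_section(text):
--     rest = _drop_until_discussion(text.splitlines())
--     if not rest:
--         return text
--     return "\n".join([rest[0]] + _take_until_blank(rest[1:]))
-- ===== Notes on version B (the rewrite author's own statement) =====
-- stated objective: simpler
-- what changed: Replaces A's single pass with a capture flag and accumulator by a locate-then-slice decomposition: drop lines until the first one mentioning 'discussion', then take lines until the first blank one, and join; text is returned unchanged when no line matches.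
import Mathlib
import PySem

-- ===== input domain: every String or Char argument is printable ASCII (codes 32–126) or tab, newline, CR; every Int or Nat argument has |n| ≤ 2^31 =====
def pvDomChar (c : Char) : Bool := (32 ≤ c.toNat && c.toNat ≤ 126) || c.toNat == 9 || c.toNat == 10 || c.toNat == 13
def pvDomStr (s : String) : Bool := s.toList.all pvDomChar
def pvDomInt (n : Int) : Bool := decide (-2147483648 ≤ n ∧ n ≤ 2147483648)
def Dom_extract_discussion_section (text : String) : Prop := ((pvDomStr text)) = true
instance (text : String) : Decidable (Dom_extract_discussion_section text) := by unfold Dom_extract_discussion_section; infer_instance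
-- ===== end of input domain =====

-- B replaces A's single flag-accumulating pass by a locate-then-slice decomposition
-- (dropwhile to the first "discussion" line, then takewhile to the first blank line); objective: simpler.

-- ===== PORT A =====
-- the for-loop of A: state = (discussion_lines, capture); break returns the accumulator
def pvLoopA : List String → List String → Bool → List String
  | [], acc, _ => acc
  | l :: rest, acc, cap =>
    if PySem.Str.isIn "discussion" (PySem.Str.lower l) then
      pvLoopA rest (acc ++ [l]) true
    else if cap && (PySem.Str.strip l == "") then acc
    else if cap then pvLoopA rest (acc ++ [l]) cap
    else pvLoopA rest acc cap

def extract_discussion_section (text : String) : String :=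
  let lines := PySem.Str.splitlines text
  let discussion_lines := pvLoopA lines [] false
  if discussion_lines.isEmpty then text else PySem.Str.join "\n" discussion_lines

-- ===== PORT B =====
def pvDropUntilDiscussion (lines : List String) : List String :=
  lines.dropWhile (fun l => !(PySem.Str.isIn "discussion" (PySem.Str.lower l)))

def pvTakeUntilBlank (lines : List String) : List String :=
  lines.takeWhile (fun l => !(PySem.Str.strip l == ""))

def extract_discussion_section_alt (text : String) : String :=
  match pvDropUntilDiscussion (PySem.Str.splitlines text) with
  | [] => text
  | h :: t => PySem.Str.join "\n" ([h] ++ pvTakeUntilBlank t)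

-- ===== PRECONDITION & SPEC =====
def Spec_extract_discussion_section (text : String) (out : String) : Prop := out = extract_discussion_section_alt text
instance (text : String) (out : String) : Decidable (Spec_extract_discussion_section text out) := by unfold Spec_extract_discussion_section; infer_instance

-- ===== CLAIM (what is proved, stated in full; the proofs are below) =====
def Claim_equal_extract_discussion_section : Prop := ∀ (text : String), Dom_extract_discussion_section text → Spec_extract_discussion_section text (extract_discussion_section text)

-- ===== LEMMAS AND PROOFS =====

-- a string whose strip is empty consists of whitespace only
lemma pv_strip_nil_all_space (s : List Char) (h : PySem.Chars.strip s = []) :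
    ∀ c ∈ s, PySem.Chars.isspace c = true := by
  unfold PySem.Chars.strip PySem.Chars.rstrip PySem.Chars.lstrip at h
  have h2 : List.dropWhile PySem.Chars.isspace (List.dropWhile PySem.Chars.isspace s).reverse = [] := by
    simpa using h
  have h3 : ∀ x ∈ List.dropWhile PySem.Chars.isspace s, PySem.Chars.isspace x = true := by
    intro x hx
    exact List.dropWhile_eq_nil_iff.mp h2 x (List.mem_reverse.mpr hx)
  have h4 : List.dropWhile PySem.Chars.isspace s = [] := by
    by_contra hne
    have hh := List.head_dropWhile_not (p := PySem.Chars.isspace) (l := s) hne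
    have hm := List.head_mem hne
    have := h3 _ hm
    simp [this] at hh
  exact List.dropWhile_eq_nil_iff.mp h4

-- a line mentioning "discussion" (case-insensitively) is not blank
lemma pv_not_blank_of_discussion (l : String)
    (h : PySem.Str.isIn "discussion" (PySem.Str.lower l) = true) :
    (PySem.Str.strip l == "") = false := by
  rw [PySem.Str.isIn_iff_infix] at h
  have hd : 'd' ∈ (PySem.Str.lower l).toList := h.subset (by decide)
  rw [PySem.Str.toList_lower] at hd
  unfold PySem.Chars.lower at hd
  obtain ⟨c, hc, hlc⟩ := List.mem_map.mp hd
  have hns : PySem.Chars.isspace c = false := by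
    by_cases hu : PySem.Chars.isupper c = true
    · unfold PySem.Chars.isupper at hu
      simp only [Bool.and_eq_true, decide_eq_true_eq, Char.le_def, UInt32.le_iff_toNat_le] at hu
      unfold PySem.Chars.isspace
      simp only [Char.toNat, Bool.or_eq_false_iff, Bool.and_eq_false_iff, decide_eq_false_iff_not]
      have hA : 'A'.val.toNat = 65 := rfl
      have hZ : 'Z'.val.toNat = 90 := rfl
      rw [hA, hZ] at hu
      omega
    · unfold PySem.Chars.lowerChar at hlc
      rw [if_neg hu] at hlc
      subst hlc
      decide
  by_contra hb
  have hb' : PySem.Str.strip l = "" := by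
    cases hB : (PySem.Str.strip l == "") with
    | false => exact absurd hB hb
    | true => exact eq_of_beq hB
  have htl : PySem.Chars.strip l.toList = [] := by
    have := congrArg String.toList hb'
    rwa [PySem.Str.toList_strip] at this
  have := pv_strip_nil_all_space l.toList htl c hc
  rw [hns] at this
  exact Bool.false_ne_true this

-- capture phase of A's loop = append takewhile-not-blank
lemma pvLoopA_true (t : List String) : ∀ acc : List String,
    pvLoopA t acc true = acc ++ pvTakeUntilBlank t := by
  induction t with
  | nil => intro acc; simp [pvLoopA, pvTakeUntilBlank]
  | cons l rest ih =>
    intro acc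
    simp only [pvTakeUntilBlank] at *
    by_cases hd : PySem.Str.isIn "discussion" (PySem.Str.lower l) = true
    · have hnb := pv_not_blank_of_discussion l hd
      rw [pvLoopA, if_pos hd, ih, List.takeWhile_cons]
      simp only [hnb, Bool.not_false, if_true, List.append_assoc, List.singleton_append]
    · by_cases hb : (PySem.Str.strip l == "") = true
      · rw [pvLoopA, if_neg hd, if_pos (by rw [hb]; rfl), List.takeWhile_cons]
        simp only [hb, Bool.not_true, Bool.false_eq_true, if_false, List.append_nil]
      · simp only [Bool.not_eq_true] at hb
        rw [pvLoopA, if_neg hd, if_neg (by rw [hb]; simp), if_pos rfl, ih, List.takeWhile_cons]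
        simp only [hb, Bool.not_false, if_true, List.append_assoc, List.singleton_append]

-- search phase of A's loop = dropwhile-to-discussion, then the capture phase
lemma pvLoopA_false (lines : List String) :
    pvLoopA lines [] false =
      match pvDropUntilDiscussion lines with
      | [] => []
      | h :: t => [h] ++ pvTakeUntilBlank t := by
  induction lines with
  | nil => simp [pvLoopA, pvDropUntilDiscussion]
  | cons l rest ih =>
    simp only [pvDropUntilDiscussion] at *
    by_cases hd : PySem.Str.isIn "discussion" (PySem.Str.lower l) = true
    · rw [pvLoopA, if_pos hd, pvLoopA_true, List.dropWhile_cons]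
      simp only [hd, Bool.not_true, Bool.false_eq_true, if_false, List.nil_append]
    · simp only [Bool.not_eq_true] at hd
      rw [pvLoopA, if_neg (by rw [hd]; simp), if_neg (by simp), if_neg (by simp),
        List.dropWhile_cons]
      simp only [hd, Bool.not_false, if_true]
      exact ih

-- ===== VERDICT (by name: the statement is the Claim_ definition above) =====
theorem extract_discussion_section_spec : Claim_equal_extract_discussion_section := by
  intro text _
  show extract_discussion_section text = extract_discussion_section_alt text
  rw [extract_discussion_section, extract_discussion_section_alt]
  simp only [pvLoopA_false]
  cases h : pvDropUntilDiscussion (PySem.Str.splitlines text) with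
  | nil => simp
  | cons hd tl => simp
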